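-- pv_equiv track=rewrite | github.com/jiacheng-xu/DiscoBERT | model/data_reader.py | label_filter
-- ===== SOURCE A (Python) =====
-- def label_filter(labs):
--     rt_list = []
--     cur_min_cnt = 100
--     for l in labs:
--         s = sum(l)
--         if s < cur_min_cnt:
--             cur_min_cnt = s
--             rt_list.insert(0, l)
--         else:
--             rt_list.append(l)
--     return rt_list
--     pass
-- ===== SOURCE B (Python) =====
-- def label_filter(labs):
--     # Staged passes: precompute row sums, then the table of prefix minima
--     # (seeded with 100), mark each row as a "new minimum" against that table,
--     # and assemble reversed minima-rows followed by the remaining rows.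
--     sums = [sum(l) for l in labs]
--     prefmins = []
--     m = 100
--     for s in sums:
--         prefmins.append(m)
--         m = min(m, s)
--     flags = [s < p for s, p in zip(sums, prefmins)]
--     recs = [l for l, f in zip(labs, flags) if f]
--     rest = [l for l, f in zip(labs, flags) if not f]
--     return recs[::-1] + rest
-- ===== Notes on version B (the rewrite author's own statement) =====
-- stated objective: alternative
-- what changed: Replaces A's single mutating loop with insert(0)/append by a staged table-driven computation: first the list of row sums, then a table of prefix minima seeded with 100, then boolean new-minimum flags, and finally two filtering comprehensions whose results are assembled as reversed(records)+rest; avoids A's quadratic front insertions.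
import Mathlib
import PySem

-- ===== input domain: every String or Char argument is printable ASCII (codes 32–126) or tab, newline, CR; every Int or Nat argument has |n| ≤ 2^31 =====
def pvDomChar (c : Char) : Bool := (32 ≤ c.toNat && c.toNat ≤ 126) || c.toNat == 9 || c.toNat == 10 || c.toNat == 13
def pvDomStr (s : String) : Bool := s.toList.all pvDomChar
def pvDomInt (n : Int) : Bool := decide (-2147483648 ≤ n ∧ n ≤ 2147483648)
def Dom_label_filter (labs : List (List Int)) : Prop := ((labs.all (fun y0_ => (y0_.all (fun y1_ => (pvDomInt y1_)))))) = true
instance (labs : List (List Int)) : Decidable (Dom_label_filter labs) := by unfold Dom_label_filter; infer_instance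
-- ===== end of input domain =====

-- B replaces A's single insert(0)/append loop by staged passes (row sums, prefix-minimum table, flags, two filters); objective: alternative decomposition.


-- ===== PORT A =====
-- step of A's loop: state = (rt_list, cur_min_cnt); insert(0, l) = cons, append = ++ [l]
def aStep (st : List (List Int) × Int) (l : List Int) : List (List Int) × Int :=
  let s := l.sum
  if s < st.2 then (l :: st.1, s) else (st.1 ++ [l], st.2)

def label_filter (labs : List (List Int)) : List (List Int) :=
  (labs.foldl aStep ([], 100)).1

-- ===== PORT B =====
def label_filter_alt (labs : List (List Int)) : List (List Int) :=
  let sums := labs.map (fun l => l.sum)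
  -- prefmins loop: state = (prefmins, m)
  let st := sums.foldl (fun (st : List Int × Int) s => (st.1 ++ [st.2], min st.2 s)) ([], 100)
  let prefmins := st.1
  let flags := (sums.zip prefmins).map (fun p => decide (p.1 < p.2))
  let recs := ((labs.zip flags).filter (fun p => p.2)).map (fun p => p.1)
  let rest := ((labs.zip flags).filter (fun p => !p.2)).map (fun p => p.1)
  recs.reverse ++ rest

-- ===== PRECONDITION & SPEC =====
def Spec_label_filter (labs : List (List Int)) (out : List (List Int)) : Prop := out = label_filter_alt labs
instance (labs : List (List Int)) (out : List (List Int)) : Decidable (Spec_label_filter labs out) := by unfold Spec_label_filter; infer_instance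

-- ===== CLAIM (what is proved, stated in full; the proofs are below) =====
def Claim_equal_label_filter : Prop := ∀ (labs : List (List Int)), Dom_label_filter labs → Spec_label_filter labs (label_filter labs)

-- ===== LEMMAS AND PROOFS =====

-- reference prefix-minimum table
def pmins : List Int → Int → List Int
  | [], _ => []
  | s :: t, m => m :: pmins t (min m s)

theorem pmins_foldl (sums : List Int) (acc : List Int) (m : Int) :
    (sums.foldl (fun (st : List Int × Int) s => (st.1 ++ [st.2], min st.2 s)) (acc, m)).1
      = acc ++ pmins sums m := by
  induction sums generalizing acc m with
  | nil => simp [pmins]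
  | cons s t ih => simpa [pmins] using ih (acc ++ [m]) (min m s)

-- reference record / non-record sequences of A's loop
def recsOf : List (List Int) → Int → List (List Int)
  | [], _ => []
  | l :: t, m => if l.sum < m then l :: recsOf t l.sum else recsOf t m

def othersOf : List (List Int) → Int → List (List Int)
  | [], _ => []
  | l :: t, m => if l.sum < m then othersOf t l.sum else l :: othersOf t m

theorem aFold_eq (labs : List (List Int)) (L0 : List (List Int)) (m : Int) :
    (labs.foldl aStep (L0, m)).1 = (recsOf labs m).reverse ++ L0 ++ othersOf labs m := by
  induction labs generalizing L0 m with
  | nil => simp [recsOf, othersOf]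
  | cons l t ih =>
    by_cases h : l.sum < m
    · simp [aStep, h, recsOf, othersOf, ih (l :: L0) l.sum]
    · simp [aStep, h, recsOf, othersOf, ih (L0 ++ [l]) m]

theorem recs_zip (labs : List (List Int)) (m : Int) :
    (((labs.zip (((labs.map (fun l => l.sum)).zip (pmins (labs.map (fun l => l.sum)) m)).map
        (fun p => decide (p.1 < p.2)))).filter (fun p => p.2)).map (fun p => p.1))
      = recsOf labs m := by
  induction labs generalizing m with
  | nil => simp [recsOf]
  | cons l t ih =>
    by_cases h : l.sum < m
    · have hm : min m l.sum = l.sum := by omega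
      simp [pmins, recsOf, h, hm, ih l.sum]
    · have hm : min m l.sum = m := by omega
      simp [pmins, recsOf, h, hm, ih m]

theorem others_zip (labs : List (List Int)) (m : Int) :
    (((labs.zip (((labs.map (fun l => l.sum)).zip (pmins (labs.map (fun l => l.sum)) m)).map
        (fun p => decide (p.1 < p.2)))).filter (fun p => !p.2)).map (fun p => p.1))
      = othersOf labs m := by
  induction labs generalizing m with
  | nil => simp [othersOf]
  | cons l t ih =>
    by_cases h : l.sum < m
    · have hm : min m l.sum = l.sum := by omega
      simp [pmins, othersOf, h, hm, ih l.sum]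
    · have hm : min m l.sum = m := by omega
      simp [pmins, othersOf, h, hm, ih m]

-- ===== VERDICT (by name: the statement is the Claim_ definition above) =====
theorem label_filter_spec : Claim_equal_label_filter := by
  intro labs _
  unfold Spec_label_filter label_filter label_filter_alt
  simp only [pmins_foldl, List.nil_append]
  rw [aFold_eq labs [] 100, recs_zip labs 100, others_zip labs 100]
  simp
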